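-- pv_equiv track=rewrite | github.com/LuisOC89/Vigenere_Cypher_Python | python_format_files/decypher_vigenere.py | creating_string_with_keyword
-- ===== SOURCE A (Python) =====
-- def creating_string_with_keyword(original_text, akey):
--     str_key = ""
--     space_counter = 0
--     for counter in range(len(original_text)):
--         each_char = original_text[counter]
--         if each_char == " ":
--             str_key = str_key + " "
--             space_counter = space_counter + 1
--         elif each_char.isalpha() == False:
--             str_key = str_key + ' '
--             space_counter = space_counter + 1
--         else:
--             str_key = str_key + akey[(counter - space_counter) % len(akey)]
--     return str_key
-- ===== SOURCE B (Python) =====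
-- def creating_string_with_keyword(original_text, akey):
--     out = []
--     rem = []
--     for ch in original_text:
--         if ch.isalpha():
--             if not rem:
--                 rem = list(reversed(akey))
--             out.append(rem.pop())
--         else:
--             out.append(' ')
--     return ''.join(out)
-- ===== Notes on version B (the rewrite author's own statement) =====
-- stated objective: simpler
-- what changed: Replaces the counter/space_counter modular index arithmetic with a consumable key stack (reversed key list refilled when empty, popped once per alphabetic char), appending into a list joined once at the end instead of repeated string concatenation.
import Mathlib
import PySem

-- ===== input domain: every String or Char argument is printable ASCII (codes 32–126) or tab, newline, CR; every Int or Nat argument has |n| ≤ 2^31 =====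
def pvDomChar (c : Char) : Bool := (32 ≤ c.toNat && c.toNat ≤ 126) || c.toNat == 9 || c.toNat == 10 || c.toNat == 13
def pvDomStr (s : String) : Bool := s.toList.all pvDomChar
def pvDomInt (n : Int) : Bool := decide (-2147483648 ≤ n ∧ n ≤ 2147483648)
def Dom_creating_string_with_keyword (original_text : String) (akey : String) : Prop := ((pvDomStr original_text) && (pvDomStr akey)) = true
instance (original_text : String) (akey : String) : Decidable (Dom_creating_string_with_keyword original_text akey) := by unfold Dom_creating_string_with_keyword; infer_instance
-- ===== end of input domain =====

-- B replaces A's counter/space_counter modular arithmetic with a consumable key stack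
-- (reversed key, refilled when empty, popped per alphabetic char); proved equal wherever A returns.


-- ===== PORT A =====
-- one loop step of A: state (str_key, space_counter), input (counter, each_char)
def pvStepA (akey : List Char) (st : List Char × Int) (p : Int × Char) : List Char × Int :=
  if p.2 = ' ' then (st.1 ++ [' '], st.2 + 1)
  else if PySem.Chars.isalpha p.2 = false then (st.1 ++ [' '], st.2 + 1)
  else (st.1 ++ [PySem.List.pyGetD akey (PySem.Int.mod (p.1 - st.2) (PySem.List.len akey)) ' '], st.2)

def creating_string_with_keyword (original_text : String) (akey : String) : String :=
  let t := original_text.toList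
  let st := (PySem.List.pyRange 0 (PySem.List.len t) 1).foldl
    (fun st counter => pvStepA akey.toList st (counter, PySem.List.pyGetD t counter ' '))
    ([], 0)
  String.ofList st.1

-- ===== PORT B =====
-- one loop step of B: state (out, rem); rem is the consumable key stack (reversed key)
def pvStepB (akey : List Char) (st : List Char × List Char) (ch : Char) : List Char × List Char :=
  if PySem.Chars.isalpha ch then
    let rem := if st.2.isEmpty then akey.reverse else st.2
    match PySem.List.pop? rem (-1) with
    | some (c, rest) => (st.1 ++ [c], rest)
    | none => (st.1 ++ [' '], [])   -- Python raises IndexError here (empty key), excluded by Pre_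
  else (st.1 ++ [' '], st.2)

def creating_string_with_keyword_alt (original_text : String) (akey : String) : String :=
  String.ofList ((original_text.toList.foldl (pvStepB akey.toList) ([], [])).1)

-- ===== PRECONDITION & SPEC =====
-- Pre_ excludes exactly the inputs where A raises ZeroDivisionError: an empty key together
-- with at least one alphabetic character in the text (B raises IndexError there).
def Pre_creating_string_with_keyword (original_text : String) (akey : String) : Prop :=
  akey.toList ≠ [] ∨ (∀ c ∈ original_text.toList, PySem.Chars.isalpha c = false)
instance (original_text : String) (akey : String) : Decidable (Pre_creating_string_with_keyword original_text akey) := by unfold Pre_creating_string_with_keyword; infer_instance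

def pvWitness_creating_string_with_keyword : String × String := ("attack at dawn!", "key")

def Spec_creating_string_with_keyword (original_text : String) (akey : String) (out : String) : Prop := out = creating_string_with_keyword_alt original_text akey
instance (original_text : String) (akey : String) (out : String) : Decidable (Spec_creating_string_with_keyword original_text akey out) := by unfold Spec_creating_string_with_keyword; infer_instance

-- ===== CLAIM (what is proved, stated in full; the proofs are below) =====
def Claim_equal_creating_string_with_keyword : Prop := ∀ (original_text : String) (akey : String), Dom_creating_string_with_keyword original_text akey → Pre_creating_string_with_keyword original_text akey → Spec_creating_string_with_keyword original_text akey (creating_string_with_keyword original_text akey)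

-- ===== LEMMAS AND PROOFS =====

-- key character A selects at the j-th alphabetic position
theorem pv_keychar (K : List Char) (hm : 0 < K.length) (j : Nat) (start sc : Int)
    (h : start - sc = (j : Int)) :
    PySem.List.pyGetD K (PySem.Int.mod (start - sc) (PySem.List.len K)) ' '
      = K[j % K.length]'(Nat.mod_lt _ hm) := by
  rw [h, PySem.List.len_eq, PySem.Int.mod_natCast, PySem.List.pyGetD_natCast]
  simp [List.getD_eq_getElem?_getD, Nat.mod_lt _ hm]

-- main loop invariant (nonempty key): A's (start, start - j) state matches
-- B's stack (K.drop k).reverse when k ≡ j (mod |K|), k ≤ |K|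
theorem pv_loop_eq (K : List Char) (hK : K ≠ [])
    (l : List Char) : ∀ (j k : Nat) (start : Int) (acc : List Char),
    k ≤ K.length → k % K.length = j % K.length →
    ((PySem.List.enumerate l start).foldl (pvStepA K) (acc, start - j)).1
      = (l.foldl (pvStepB K) (acc, (K.drop k).reverse)).1 := by
  induction l with
  | nil => intro j k start acc _ _; simp [PySem.List.enumerate_nil]
  | cons c l ih =>
    intro j k start acc hk hmod
    have hm : 0 < K.length := List.length_pos_iff.mpr hK
    rw [PySem.List.enumerate_cons]
    simp only [List.foldl_cons]
    by_cases ha : PySem.Chars.isalpha c = true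
    · -- alphabetic step
      have hcs : c ≠ ' ' := by
        intro h; subst h; exact absurd ha (by decide)
      have hA : pvStepA K (acc, start - j) (start, c)
          = (acc ++ [K[j % K.length]'(Nat.mod_lt _ hm)], start - j) := by
        simp only [pvStepA]
        rw [if_neg hcs, if_neg (by simp [ha])]
        rw [pv_keychar K hm j start (start - j) (by ring)]
      by_cases hke : k = K.length
      · -- B's stack is empty: refill from the reversed key
        have hrm : ((K.drop k).reverse : List Char) = [] := by simp [hke]
        have hj0 : j % K.length = 0 := by rw [← hmod, hke, Nat.mod_self]
        obtain ⟨c0, K', hKeq⟩ : ∃ c0 K', K = c0 :: K' := by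
          cases K with | nil => exact absurd rfl hK | cons a b => exact ⟨a, b, rfl⟩
        have hpop : PySem.List.pop? K.reverse (-1) = some (c0, K'.reverse) := by
          rw [hKeq]; simpa using PySem.List.pop?_last K'.reverse c0
        have hgot : K[j % K.length]'(Nat.mod_lt _ hm) = c0 := by
          subst hKeq
          have hj0' : j % (K'.length + 1) = 0 := by simpa using hj0
          simp [hj0']
        have hB : pvStepB K (acc, (K.drop k).reverse) c
            = (acc ++ [K[j % K.length]'(Nat.mod_lt _ hm)], (K.drop 1).reverse) := by
          simp only [pvStepB, ha, if_true, hrm, List.isEmpty_nil, hpop, hgot]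
          refine Prod.ext ?_ ?_ <;> simp [hKeq]
        rw [hA, hB]
        have hst : start - (j : Int) = (start + 1) - ((j + 1 : Nat) : Int) := by push_cast; ring
        rw [hst]
        exact ih (j + 1) 1 (start + 1) _ hm
          (by rw [Nat.add_mod, hj0, Nat.zero_add, Nat.mod_mod_of_dvd 1 (dvd_refl K.length)])
      · -- B's stack is nonempty: pop the next key character
        have hklt : k < K.length := lt_of_le_of_ne hk hke
        have hdrop : K.drop k = K[k] :: K.drop (k + 1) :=
          (List.getElem_cons_drop hklt).symm
        have hkj : K[k]'hklt = K[j % K.length]'(Nat.mod_lt _ hm) := by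
          congr 1; rw [← Nat.mod_eq_of_lt hklt, hmod]
        have hrev : (K.drop k).reverse = (K.drop (k + 1)).reverse ++ [K[k]'hklt] := by
          rw [hdrop]; simp
        have hpop : PySem.List.pop? (K.drop k).reverse (-1)
            = some (K[k]'hklt, (K.drop (k + 1)).reverse) := by
          rw [hrev]; exact PySem.List.pop?_last _ _
        have hne : ((K.drop k).reverse).isEmpty = false := by
          rw [hrev]; simp
        have hB : pvStepB K (acc, (K.drop k).reverse) c
            = (acc ++ [K[j % K.length]'(Nat.mod_lt _ hm)], (K.drop (k + 1)).reverse) := by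
          simp only [pvStepB, ha, if_true, hne, Bool.false_eq_true, if_false, hpop, hkj]
        rw [hA, hB]
        have hst : start - (j : Int) = (start + 1) - ((j + 1 : Nat) : Int) := by push_cast; ring
        rw [hst]
        exact ih (j + 1) (k + 1) (start + 1) _ hklt
          (by rw [Nat.add_mod, Nat.add_mod j 1, hmod])
    · -- non-alphabetic step (space or other): both append a space
      have hA : pvStepA K (acc, start - j) (start, c)
          = (acc ++ [' '], start - j + 1) := by
        by_cases hcs : c = ' '
        · simp [pvStepA, hcs]
        · simp [pvStepA, hcs, ha]
      have hB : pvStepB K (acc, (K.drop k).reverse) c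
          = (acc ++ [' '], (K.drop k).reverse) := by
        simp [pvStepB, ha]
      rw [hA, hB]
      have hst : start - (j : Int) + 1 = (start + 1) - j := by ring
      rw [hst]
      exact ih j k (start + 1) (acc ++ [' ']) hk hmod

-- if every character is non-alphabetic, both loops write only spaces (any key, any stack)
theorem pv_loop_nonalpha (K : List Char) (l : List Char) :
    ∀ (start sc : Int) (acc rem : List Char),
    (∀ c ∈ l, PySem.Chars.isalpha c = false) →
    ((PySem.List.enumerate l start).foldl (pvStepA K) (acc, sc)).1
      = (l.foldl (pvStepB K) (acc, rem)).1 := by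
  induction l with
  | nil => intro start sc acc rem _; simp [PySem.List.enumerate_nil]
  | cons c l ih =>
    intro start sc acc rem h
    have hc : PySem.Chars.isalpha c = false := h c (by simp)
    rw [PySem.List.enumerate_cons]
    simp only [List.foldl_cons]
    have hA : pvStepA K (acc, sc) (start, c) = (acc ++ [' '], sc + 1) := by
      by_cases hcs : c = ' '
      · simp [pvStepA, hcs]
      · simp [pvStepA, hcs, hc]
    have hB : pvStepB K (acc, rem) c = (acc ++ [' '], rem) := by
      simp [pvStepB, hc]
    rw [hA, hB]
    exact ih (start + 1) (sc + 1) (acc ++ [' ']) rem (fun x hx => h x (by simp [hx]))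

-- A's range-indexed fold is the fold of pvStepA over the enumerated character list
theorem pv_portA_eq_enum (original_text : String) (akey : String) :
    creating_string_with_keyword original_text akey
      = String.ofList (((PySem.List.enumerate original_text.toList 0).foldl
          (pvStepA akey.toList) ([], 0)).1) := by
  simp only [creating_string_with_keyword]
  rw [PySem.List.enumerate_eq_map_pyRange (xs := original_text.toList) (d := ' '),
    List.foldl_map]

-- ===== VERDICT (by name: the statement is the Claim_ definition above) =====
theorem creating_string_with_keyword_spec : Claim_equal_creating_string_with_keyword := by
  intro original_text akey _ hpre
  unfold Spec_creating_string_with_keyword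
  rw [pv_portA_eq_enum]
  simp only [creating_string_with_keyword_alt]
  congr 1
  by_cases hK : akey.toList = []
  · rcases hpre with h | h
    · exact absurd hK h
    · exact pv_loop_nonalpha akey.toList original_text.toList 0 0 [] [] h
  · have h0 : (0 : Int) = 0 - ((0 : Nat) : Int) := by simp
    have hd : ([] : List Char) = (akey.toList.drop akey.toList.length).reverse := by simp
    calc ((PySem.List.enumerate original_text.toList 0).foldl (pvStepA akey.toList) ([], 0)).1
        = ((PySem.List.enumerate original_text.toList 0).foldl (pvStepA akey.toList)
            ([], (0 : Int) - ((0 : Nat) : Int))).1 := by norm_num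
      _ = (original_text.toList.foldl (pvStepB akey.toList)
            ([], (akey.toList.drop akey.toList.length).reverse)).1 :=
          pv_loop_eq akey.toList hK original_text.toList 0 akey.toList.length 0 []
            le_rfl (by simp)
      _ = (original_text.toList.foldl (pvStepB akey.toList) ([], [])).1 := by rw [← hd]
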